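-- pv_equiv track=rewrite | github.com/hjyoon/baekjoon-answers | 19948.py | solution
-- ===== SOURCE A (Python) =====
-- def solution(S, W, C):
--     ans = None
--     ans = ''.join(map(lambda x:x[0].upper(), S.split()))
--     S += ans
--
--     d = {' ':W}
--     for i, v in enumerate(C, ord('A')):
--         d[chr(i)] = v
--
--     pre = None
--     for s in S:
--         s = s.upper() if s.isalpha() else s
--         if s == pre:
--             continue
--         if d[s] > 0:
--             d[s] -= 1
--             pre = s
--         else:
--             ans = -1
--             break
--
--     return str(ans) if type(ans) != str else ans
-- ===== SOURCE B (Python) =====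
-- def solution(S, W, C):
--     acr = ''.join(w[0].upper() for w in S.split())
--     norm = [c.upper() if c.isalpha() else c for c in S + acr]
--     starts = [x for x, p in zip(norm, [None] + norm) if x != p]
--     d = {' ': W}
--     for i, v in enumerate(C):
--         d[chr(ord('A') + i)] = v
--     return acr if all(d[c] >= starts.count(c) for c in dict.fromkeys(starts)) else '-1'
-- ===== Notes on version B (the rewrite author's own statement) =====
-- stated objective: alternative
-- what changed: A simulates typing sequentially with a mutable per-key budget dict and an early break; B collapses the normalized text (zip/filter) into run-start characters and compares, per distinct character in first-occurrence order (dict.fromkeys), the total number of runs against its limit.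
-- outside the precondition, e.g. on solution('A caAc A', 1, [0, 0]): A returns '-1', B returns '-1'
import Mathlib
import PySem

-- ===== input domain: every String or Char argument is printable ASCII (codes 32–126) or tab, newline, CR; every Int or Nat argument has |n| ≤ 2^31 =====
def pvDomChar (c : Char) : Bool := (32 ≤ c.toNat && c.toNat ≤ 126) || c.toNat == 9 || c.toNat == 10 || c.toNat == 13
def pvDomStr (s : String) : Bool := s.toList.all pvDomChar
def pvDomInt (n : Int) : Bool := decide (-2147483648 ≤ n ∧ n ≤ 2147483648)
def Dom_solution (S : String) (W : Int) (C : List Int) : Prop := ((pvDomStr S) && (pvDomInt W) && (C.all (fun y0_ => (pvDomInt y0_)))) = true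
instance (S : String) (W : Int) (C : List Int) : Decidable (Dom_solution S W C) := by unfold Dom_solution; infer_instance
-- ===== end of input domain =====

-- B replaces A's sequential budget simulation (mutable dict, early break) by counting runs per
-- character and comparing each total against its limit; objective: alternative (same cost class).

-- ===== PORT A =====
-- the acronym ''.join(map(lambda x:x[0].upper(), S.split()))
def pvAcrA (S : String) : String :=
  PySem.Str.join "" ((PySem.Str.split₀ S).map (fun x =>
    match PySem.Str.pyGet? x 0 with
    | some c => String.ofList [PySem.Chars.upperChar c]
    | none => ""))   -- unreachable: words from split() are nonempty

-- A's typing loop: s normalized inline, repeats of pre skipped, budget decremented, break = false.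
-- d[s] on a missing key is a Python KeyError: 'none => false' is outside Pre_solution.
def pvAloop (d : PySem.Dict Char Int) (pre : Option Char) : List Char → Bool
  | [] => true
  | ch :: rest =>
      let s := if PySem.Chars.isalpha ch then PySem.Chars.upperChar ch else ch
      if some s = pre then pvAloop d pre rest
      else match d.get? s with
        | some v => if v > 0 then pvAloop (d.insert s (v - 1)) (some s) rest else false
        | none => false

def solution (S : String) (W : Int) (C : List Int) : String :=
  let ans := pvAcrA S
  let S2 := S ++ ans
  let d0 : PySem.Dict Char Int := (PySem.Dict.empty).insert ' ' W
  let d := (PySem.List.enumerate C 65).foldl (fun dd p => dd.insert (Char.ofNat p.1.toNat) p.2) d0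
  if pvAloop d none S2.toList then ans else "-1"

-- ===== PORT B =====
def solution_alt (S : String) (W : Int) (C : List Int) : String :=
  -- acr = ''.join(w[0].upper() for w in S.split())
  let acr := PySem.Str.join "" ((PySem.Str.split₀ S).map (fun w =>
    match PySem.Str.pyGet? w 0 with
    | some c => String.ofList [PySem.Chars.upperChar c]
    | none => ""))
  -- norm = [c.upper() if c.isalpha() else c for c in S + acr]
  let norm := (S ++ acr).toList.map (fun c => if PySem.Chars.isalpha c then PySem.Chars.upperChar c else c)
  -- starts = [x for x, p in zip(norm, [None] + norm) if x != p]   (first char of every run)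
  let starts := ((norm.zip ((none : Option Char) :: norm.map some)).filter
                  (fun q => !(some q.1 == q.2))).map Prod.fst
  let d0 : PySem.Dict Char Int := (PySem.Dict.empty).insert ' ' W
  let d := (PySem.List.enumerate C 0).foldl (fun dd p => dd.insert (Char.ofNat (65 + p.1).toNat) p.2) d0
  -- all(d[c] >= starts.count(c) for c in dict.fromkeys(starts)); d[c] KeyError ('none') is outside Pre_solution
  if (PySem.List.dedup starts).all (fun c =>
       match d.get? c with
       | some v => decide ((PySem.List.count starts c : Int) ≤ v)
       | none => false)
  then acr else "-1"

-- ===== PRECONDITION & SPEC =====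
-- Pre_ excludes inputs containing a character other than a space or a letter with index < len(C):
-- on those Python A raises KeyError, except when its budget happens to run out before the first
-- such character (A then returns '-1', an accident of where its scan stops, and B returns '-1'
-- too, while B also returns '-1' on some such inputs where A raises).
def Pre_solution (S : String) (W : Int) (C : List Int) : Prop :=
  (S.toList.all (fun c =>
    c == ' ' || (PySem.Chars.isalpha c && decide ((PySem.Chars.upperChar c).toNat - 65 < C.length)))) = true
instance (S : String) (W : Int) (C : List Int) : Decidable (Pre_solution S W C) := by unfold Pre_solution; infer_instance
def pvWitness_solution : String × Int × List Int := ("a b", 2, [2, 2])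

def Spec_solution (S : String) (W : Int) (C : List Int) (out : String) : Prop := out = solution_alt S W C
instance (S : String) (W : Int) (C : List Int) (out : String) : Decidable (Spec_solution S W C out) := by unfold Spec_solution; infer_instance

-- ===== CLAIM (what is proved, stated in full; the proofs are below) =====
def Claim_equal_solution : Prop := ∀ (S : String) (W : Int) (C : List Int), Dom_solution S W C → Pre_solution S W C → Spec_solution S W C (solution S W C)

-- ===== LEMMAS AND PROOFS =====

-- run-collapse relative to a previous character (proof-side normal form of both programs' skipping)
def pvDedup (pre : Option Char) : List Char → List Char
  | [] => []
  | c :: t => if some c = pre then pvDedup pre t else c :: pvDedup (some c) t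

-- sequential budget check on an already-collapsed list (A's loop without normalization/skipping)
def pvSeq (d : PySem.Dict Char Int) : List Char → Bool
  | [] => true
  | c :: r =>
      match d.get? c with
      | some v => if v > 0 then pvSeq (d.insert c (v - 1)) r else false
      | none => false

theorem pvEnumerate_shift (xs : List Int) (s : Int) :
    PySem.List.enumerate xs s = (PySem.List.enumerate xs 0).map (fun p => (s + p.1, p.2)) := by
  induction xs generalizing s with
  | nil => simp [PySem.List.enumerate_nil]
  | cons x t ih =>
      rw [PySem.List.enumerate_cons, PySem.List.enumerate_cons, ih (s + 1), ih (0 + 1)]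
      simp [List.map_map, Function.comp_def, add_assoc]

theorem pvDict_eq (d : PySem.Dict Char Int) (C : List Int) :
    (PySem.List.enumerate C 65).foldl (fun dd p => dd.insert (Char.ofNat p.1.toNat) p.2) d
      = (PySem.List.enumerate C 0).foldl (fun dd p => dd.insert (Char.ofNat (65 + p.1).toNat) p.2) d := by
  rw [pvEnumerate_shift C 65, List.foldl_map]

theorem pvZip_eq_dedup (L : List Char) (p : Option Char) :
    ((L.zip (p :: L.map some)).filter (fun q => !(some q.1 == q.2))).map Prod.fst
      = pvDedup p L := by
  induction L generalizing p with
  | nil => simp [pvDedup]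
  | cons c t ih =>
      simp only [List.map_cons, List.zip_cons_cons, List.filter_cons]
      by_cases h : some c = p
      · simp [h, pvDedup, ih]
      · have : (some c == p) = false := by simp [h]
        simp [this, pvDedup, h, ih]

theorem pvAloop_eq_seq (L : List Char) (d : PySem.Dict Char Int) (pre : Option Char) :
    pvAloop d pre L
      = pvSeq d (pvDedup pre (L.map (fun c => if PySem.Chars.isalpha c then PySem.Chars.upperChar c else c))) := by
  induction L generalizing d pre with
  | nil => simp [pvAloop, pvDedup, pvSeq]
  | cons ch t ih =>
      simp only [pvAloop, List.map_cons, pvDedup]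
      by_cases h : some (if PySem.Chars.isalpha ch then PySem.Chars.upperChar ch else ch) = pre
      · simp [h, ih]
      · simp only [if_neg h, pvSeq]
        cases hd : PySem.Dict.get?
            (d := d) (k := if PySem.Chars.isalpha ch then PySem.Chars.upperChar ch else ch) with
        | none => rfl
        | some v =>
            by_cases hv : v > 0
            · simp [hv, ih]
            · simp [hv]

theorem pvSeq_true_iff (R : List Char) (d : PySem.Dict Char Int) :
    pvSeq d R = true ↔ ∀ c ∈ R, ∃ v, d.get? c = some v ∧ (R.count c : Int) ≤ v := by
  induction R generalizing d with
  | nil => simp [pvSeq]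
  | cons c r ih =>
      simp only [pvSeq]
      cases hd : d.get? c with
      | none =>
          simp only [Bool.false_eq_true, false_iff]
          intro h
          obtain ⟨v, hv, _⟩ := h c (by simp)
          simp [hd] at hv
      | some v =>
          by_cases hv : v > 0
          · simp only [if_pos hv, ih]
            constructor
            · intro h x hx
              rcases List.mem_cons.mp hx with hxc | hxr
              · subst hxc
                refine ⟨v, hd, ?_⟩
                have hcr : ((r.count x : Int)) ≤ v - 1 := by
                  by_cases hm : x ∈ r
                  · obtain ⟨w, hw, hcount⟩ := h x hm
                    rw [PySem.Dict.get?_insert_self] at hw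
                    cases hw
                    exact hcount
                  · rw [List.count_eq_zero_of_not_mem hm]
                    push_cast
                    omega
                rw [List.count_cons_self]
                push_cast
                omega
              · obtain ⟨w, hw, hcount⟩ := h x hxr
                rw [PySem.Dict.get?_insert] at hw
                by_cases hxc : x = c
                · subst hxc
                  rw [if_pos rfl] at hw
                  cases hw
                  refine ⟨v, hd, ?_⟩
                  rw [List.count_cons_self]
                  push_cast at hcount ⊢
                  omega
                · rw [if_neg hxc] at hw
                  refine ⟨w, hw, ?_⟩
                  have hcx : ¬ c = x := fun hh => hxc hh.symm
                  have : (c :: r).count x = r.count x := by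
                    simp [hcx]
                  rw [this]
                  exact hcount
            · intro h x hx
              rw [PySem.Dict.get?_insert]
              by_cases hxc : x = c
              · subst hxc
                obtain ⟨w, hw, hcount⟩ := h x (by simp)
                rw [hd] at hw; cases hw
                refine ⟨v - 1, if_pos rfl, ?_⟩
                rw [List.count_cons_self] at hcount
                push_cast at hcount ⊢
                omega
              · obtain ⟨w, hw, hcount⟩ := h x (by simp [hx])
                have hcx : ¬ c = x := fun hh => hxc hh.symm
                have : (c :: r).count x = r.count x := by
                  simp [hcx]
                rw [this] at hcount
                exact ⟨w, by rw [if_neg hxc]; exact hw, hcount⟩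
          · simp only [if_neg hv, Bool.false_eq_true, false_iff]
            intro h
            obtain ⟨w, hw, hcount⟩ := h c (by simp)
            rw [hd] at hw; cases hw
            rw [List.count_cons_self] at hcount
            push_cast at hcount
            omega

theorem pvBcheck_true_iff (R : List Char) (d : PySem.Dict Char Int) :
    ((PySem.Set.ofList R).all (fun c =>
        match d.get? c with
        | some v => decide ((PySem.List.count R c : Int) ≤ v)
        | none => false) = true)
      ↔ ∀ c ∈ R, ∃ v, d.get? c = some v ∧ (R.count c : Int) ≤ v := by
  rw [List.all_eq_true]
  constructor
  · intro h c hc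
    have := h c ((PySem.Set.mem_ofList _ _).mpr hc)
    cases hd : d.get? c with
    | none => rw [hd] at this; simp at this
    | some v =>
        rw [hd] at this
        simp only [decide_eq_true_eq] at this
        exact ⟨v, rfl, by simpa [PySem.List.count_eq] using this⟩
  · intro h c hc
    obtain ⟨v, hv, hcount⟩ := h c ((PySem.Set.mem_ofList _ _).mp hc)
    rw [hv]
    simpa [PySem.List.count_eq] using hcount

theorem pvCheck_eq (R : List Char) (d : PySem.Dict Char Int) :
    pvSeq d R
      = (PySem.List.dedup R).all (fun c =>
          match d.get? c with
          | some v => decide ((PySem.List.count R c : Int) ≤ v)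
          | none => false) := by
  rw [Bool.eq_iff_iff, pvSeq_true_iff]
  exact (pvBcheck_true_iff R d).symm

theorem pv_main (S : String) (W : Int) (C : List Int) : solution S W C = solution_alt S W C := by
  simp only [solution, solution_alt, pvAcrA, pvDict_eq, pvZip_eq_dedup, pvAloop_eq_seq,
    pvCheck_eq]

-- ===== VERDICT (by name: the statement is the Claim_ definition above) =====
theorem solution_spec : Claim_equal_solution := by
  intro S W C _ _
  unfold Spec_solution
  exact pv_main S W C
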